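-- pv_equiv track=rewrite | github.com/valiclud/python-projects | Hackerrank/mathematics/sherlogplanes.py | solve
-- ===== SOURCE A (Python) =====
-- def solve(points):
--     previousx = points[0][0]
--     previousy = points[0][1]
--     previousz = points[0][2]
--     flagx = True
--     flagy = True
--     flagz = True
--
--     for i, p in enumerate(points, start=1):
--         if (flagx and p[0] != previousx) :
--             previousx = p[0]
--             flagx = False
--         if (flagy and p[1] != previousy) :
--             previousy = p[1]
--             flagy = False
--         if (flagz and p[2] != previousz):
--             previousz = p[2]
--             flagz = False
--
--     if (flagx or flagy or flagz):
--         return "YES"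
--     else :
--         return "NO"
-- ===== SOURCE B (Python) =====
-- def solve(points):
--     first = points[0]
--     if all(p[0] == first[0] for p in points) \
--        or all(p[1] == first[1] for p in points) \
--        or all(p[2] == first[2] for p in points):
--         return "YES"
--     return "NO"
-- ===== Notes on version B (the rewrite author's own statement) =====
-- stated objective: idiomatic
-- what changed: Replaces the single flag-maintaining interleaved pass with three independent short-circuiting per-axis all() scans against the first point; Pre_ excludes the empty list, on which both implementations raise IndexError.
import Mathlib
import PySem

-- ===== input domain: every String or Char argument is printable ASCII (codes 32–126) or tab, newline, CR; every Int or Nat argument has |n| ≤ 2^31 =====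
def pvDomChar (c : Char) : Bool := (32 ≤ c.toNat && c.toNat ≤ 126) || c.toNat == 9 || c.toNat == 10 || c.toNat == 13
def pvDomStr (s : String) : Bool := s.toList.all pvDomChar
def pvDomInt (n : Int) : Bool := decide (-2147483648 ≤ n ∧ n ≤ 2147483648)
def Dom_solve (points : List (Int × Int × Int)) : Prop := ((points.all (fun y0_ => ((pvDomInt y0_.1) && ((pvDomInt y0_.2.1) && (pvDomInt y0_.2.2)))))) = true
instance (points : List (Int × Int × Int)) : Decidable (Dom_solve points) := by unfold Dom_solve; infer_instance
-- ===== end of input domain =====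

-- B replaces A's single flag-maintaining interleaved pass with three independent
-- short-circuiting per-axis equality scans against the first point (idiomatic).

-- ===== PORT A =====
-- the loop body: the three flag/previous updates, in A's order
def solveStep (st : Int × Int × Int × Bool × Bool × Bool) (p : Int × Int × Int) :
    Int × Int × Int × Bool × Bool × Bool :=
  let (px, py, pz, fx, fy, fz) := st
  let (px, fx) := if fx && !(p.1 == px) then (p.1, false) else (px, fx)
  let (py, fy) := if fy && !(p.2.1 == py) then (p.2.1, false) else (py, fy)
  let (pz, fz) := if fz && !(p.2.2 == pz) then (p.2.2, false) else (pz, fz)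
  (px, py, pz, fx, fy, fz)

def solve (points : List (Int × Int × Int)) : String :=
  match points with
  | [] => ""  -- Python A raises IndexError on points[0]; excluded by Pre_solve
  | p0 :: _ =>
    let st := points.foldl solveStep (p0.1, p0.2.1, p0.2.2, true, true, true)
    if st.2.2.2.1 || st.2.2.2.2.1 || st.2.2.2.2.2 then "YES" else "NO"

-- ===== PORT B =====
def solve_alt (points : List (Int × Int × Int)) : String :=
  match points with
  | [] => ""  -- Python B raises IndexError on points[0]; excluded by Pre_solve
  | first :: _ =>
    if points.all (fun p => p.1 == first.1)
        || points.all (fun p => p.2.1 == first.2.1)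
        || points.all (fun p => p.2.2 == first.2.2) then "YES" else "NO"

-- ===== PRECONDITION & SPEC =====
-- Pre_ excludes only the empty list, on which A (and B) raise IndexError at points[0].
def Pre_solve (points : List (Int × Int × Int)) : Prop := points ≠ []
instance (points : List (Int × Int × Int)) : Decidable (Pre_solve points) := by unfold Pre_solve; infer_instance
def pvWitness_solve : (List (Int × Int × Int)) := [(1, 2, 3), (1, 5, 6)]

def Spec_solve (points : List (Int × Int × Int)) (out : String) : Prop := out = solve_alt points
instance (points : List (Int × Int × Int)) (out : String) : Decidable (Spec_solve points out) := by unfold Spec_solve; infer_instance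

-- ===== CLAIM (what is proved, stated in full; the proofs are below) =====
def Claim_equal_solve : Prop := ∀ (points : List (Int × Int × Int)), Dom_solve points → Pre_solve points → Spec_solve points (solve points)

-- ===== LEMMAS AND PROOFS =====

-- loop invariant: each output flag is its input flag && "every element matches the
-- corresponding previous coordinate"; the previous-coordinate drift after a flag
-- falls is irrelevant to the flags.
theorem solveStep_foldl_flags (l : List (Int × Int × Int))
    (px py pz : Int) (fx fy fz : Bool) :
    (l.foldl solveStep (px, py, pz, fx, fy, fz)).2.2.2 =
      (fx && l.all (fun p => p.1 == px),
       fy && l.all (fun p => p.2.1 == py),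
       fz && l.all (fun p => p.2.2 == pz)) := by
  induction l generalizing px py pz fx fy fz with
  | nil => simp
  | cons p t ih =>
    simp only [List.foldl_cons, solveStep, List.all_cons]
    by_cases hx : p.1 = px <;> by_cases hy : p.2.1 = py <;> by_cases hz : p.2.2 = pz <;>
      cases fx <;> cases fy <;> cases fz <;>
      simp [hx, hy, hz, ih]

theorem solve_spec' (points : List (Int × Int × Int)) (h : Pre_solve points) :
    solve points = solve_alt points := by
  match points, h with
  | p0 :: t, _ =>
    simp only [solve, solve_alt]
    rw [solveStep_foldl_flags]
    simp only [Bool.true_and]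

-- ===== VERDICT (by name: the statement is the Claim_ definition above) =====
theorem solve_spec : Claim_equal_solve := by
  intro points _ hpre
  exact solve_spec' points hpre
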